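-- pv_equiv track=rewrite | github.com/DMChernowitz/Free-Fermionic-Hilbert-Search | Lieb_Liniger_Algo.py | boxicles
-- ===== SOURCE A (Python) =====
-- def boxicles(n,deps): #puts n particles in boxes with maximal capacity deps. oo=None was last input
--     M = len(deps)
--     if n == 0:
--         yield [0 for _ in range(M)]
--     else:
--         for preput in boxicles(n-1,deps):
--             for k in range(M):
--                 #postput = [a for a in preput]
--                 #postput[k] += 1
--                 #yield postput
--                 if preput[k]<deps[k]:
--                     yield [preput[a]+int(a==k) for a in range(M)]
--                 if preput[k]:
--                     break
-- ===== SOURCE B (Python) =====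
-- def boxicles(n, deps):
--     # bottom-up: build level i+1 from level i; inner scan runs only up to the
--     # first occupied box (the recursion's break point), computed up front.
--     M = len(deps)
--     configs = [[0] * M]
--     for _ in range(n):
--         nxt = []
--         for c in configs:
--             stop = next((i for i, v in enumerate(c) if v), M - 1)
--             for k in range(stop + 1):
--                 if c[k] < deps[k]:
--                     nxt.append(c[:k] + [c[k] + 1] + c[k + 1:])
--         configs = nxt
--     return configs
-- ===== Notes on version B (the rewrite author's own statement) =====
-- stated objective: alternative
-- what changed: Replaces the recursion on n by a bottom-up level loop over an explicit configs list, and replaces the inner scan-with-break by precomputing the first occupied box and scanning only up to it, building each new config by slicing instead of a full comprehension.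
import Mathlib
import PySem

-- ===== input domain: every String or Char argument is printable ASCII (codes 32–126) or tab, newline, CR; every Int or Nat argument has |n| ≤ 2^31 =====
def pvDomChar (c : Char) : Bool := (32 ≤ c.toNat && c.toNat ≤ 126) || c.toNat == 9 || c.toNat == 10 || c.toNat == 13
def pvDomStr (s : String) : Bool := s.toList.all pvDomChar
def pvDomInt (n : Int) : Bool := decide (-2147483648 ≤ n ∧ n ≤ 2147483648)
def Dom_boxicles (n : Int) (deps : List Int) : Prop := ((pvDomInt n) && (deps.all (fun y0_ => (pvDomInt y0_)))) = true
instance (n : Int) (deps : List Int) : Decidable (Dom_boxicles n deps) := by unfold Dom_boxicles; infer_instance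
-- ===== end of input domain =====

-- B replaces A's recursion on n by a bottom-up level loop and precomputes the break index
-- of the inner scan; equal yields in equal order (alternative decomposition, no speed claim).

-- ===== PORT A =====
-- inner 'for k in range(M): if preput[k]<deps[k]: yield …; if preput[k]: break'
def innerA (deps c : List Int) (M : Nat) : List Nat → List (List Int)
  | [] => []
  | k :: ks =>
    (if c.getD k 0 < deps.getD k 0 then
        [(List.range M).map (fun a => c.getD a 0 + if a = k then (1 : Int) else 0)]
      else [])
    ++ (if c.getD k 0 ≠ 0 then [] else innerA deps c M ks)

def boxAuxA (deps : List Int) : Nat → List (List Int)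
  | 0 => [List.replicate deps.length (0 : Int)]
  | m + 1 => (boxAuxA deps m).flatMap (fun c => innerA deps c deps.length (List.range deps.length))

def boxicles (n : Int) (deps : List Int) : List (List Int) := boxAuxA deps n.toNat

-- ===== PORT B =====
-- next((i for i, v in enumerate(c) if v), default) : index of first nonzero entry
def firstNZ : List Int → Option Nat
  | [] => none
  | v :: rest => if v ≠ 0 then some 0 else (firstNZ rest).map (· + 1)

def stepB (deps c : List Int) (M : Nat) : List (List Int) :=
  -- stop = index of first occupied box, default M-1; scan k in range(stop+1)
  (List.range (((match firstNZ c with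
      | some i => (i : Int) | none => (M : Int) - 1) + 1).toNat)).filterMap (fun k =>
    if c.getD k 0 < deps.getD k 0 then
      some (c.take k ++ [c.getD k 0 + 1] ++ c.drop (k + 1))
    else none)

def boxicles_alt (n : Int) (deps : List Int) : List (List Int) :=
  (List.range n.toNat).foldl
    (fun configs _ => configs.flatMap (fun c => stepB deps c deps.length))
    [List.replicate deps.length (0 : Int)]

-- ===== PRECONDITION & SPEC =====
-- Pre_ excludes n < 0, on which Python A recurses without a base case (RecursionError).
def Pre_boxicles (n : Int) (deps : List Int) : Prop := 0 ≤ n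
instance (n : Int) (deps : List Int) : Decidable (Pre_boxicles n deps) := by unfold Pre_boxicles; infer_instance
def pvWitness_boxicles : Int × List Int := (2, [1, 2])

def Spec_boxicles (n : Int) (deps : List Int) (out : List (List Int)) : Prop := out = boxicles_alt n deps
instance (n : Int) (deps : List Int) (out : List (List Int)) : Decidable (Spec_boxicles n deps out) := by unfold Spec_boxicles; infer_instance

-- ===== CLAIM (what is proved, stated in full; the proofs are below) =====
def Claim_equal_boxicles : Prop := ∀ (n : Int) (deps : List Int), Dom_boxicles n deps → Pre_boxicles n deps → Spec_boxicles n deps (boxicles n deps)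

-- ===== LEMMAS AND PROOFS =====

-- the list yielded by A's comprehension equals B's slice construction
lemma yield_eq (c : List Int) (M k : Nat) (hc : c.length = M) (hk : k < M) :
    (List.range M).map (fun a => c.getD a 0 + if a = k then (1 : Int) else 0)
      = c.take k ++ [c.getD k 0 + 1] ++ c.drop (k + 1) := by
  have hset : c.set k (c.getD k 0 + 1) = c.take k ++ [c.getD k 0 + 1] ++ c.drop (k + 1) := by
    rw [List.set_eq_take_append_cons_drop, if_pos (by omega)]; simp
  rw [← hset]
  apply List.ext_getElem
  · simp [hc]
  · intro i h1 h2
    have hi : i < c.length := by simpa using h2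
    simp only [List.getElem_map, List.getElem_range, List.getElem_set]
    by_cases hik : i = k
    · subst hik
      simp [List.getD_eq_getElem?_getD, List.getElem?_eq_getElem hi]
    · rw [if_neg (show ¬ k = i by omega), if_neg hik, add_zero]
      simp [List.getD_eq_getElem?_getD, List.getElem?_eq_getElem hi]

lemma fnz_some {c : List Int} {i : Nat} (h : firstNZ c = some i) :
    i < c.length ∧ c.getD i 0 ≠ 0 := by
  induction c generalizing i with
  | nil => simp [firstNZ] at h
  | cons v rest ih =>
    by_cases hv : v ≠ 0
    · simp [firstNZ, hv] at h
      subst h; simpa using hv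
    · simp [firstNZ, hv] at h
      obtain ⟨j, hj, rfl⟩ := h
      obtain ⟨h1, h2⟩ := ih hj
      constructor
      · simpa using h1
      · simpa using h2

lemma fnz_eq_some {c : List Int} {j : Nat} (hz : ∀ i, i < j → c.getD i 0 = 0)
    (hj : j < c.length) (hnz : c.getD j 0 ≠ 0) : firstNZ c = some j := by
  induction c generalizing j with
  | nil => simp at hj
  | cons v rest ih =>
    cases j with
    | zero =>
      have : v ≠ 0 := by simpa using hnz
      simp [firstNZ, this]
    | succ j' =>
      have hv : v = 0 := by simpa using hz 0 (Nat.succ_pos _)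
      have : firstNZ rest = some j' := by
        apply ih
        · intro i hi; simpa using hz (i + 1) (by omega)
        · simpa using hj
        · simpa using hnz
      simp [firstNZ, hv, this]

-- count of indices scanned by B's step
def cntB (c : List Int) (M : Nat) : Nat :=
  match firstNZ c with | some i => i + 1 | none => M

lemma cntB_le (c : List Int) (M : Nat) (hc : c.length = M) : cntB c M ≤ M := by
  cases h : firstNZ c with
  | none => simp [cntB, h]
  | some i =>
    have := (fnz_some h).1
    simp only [cntB, h]; omega

lemma inner_eq_from (deps c : List Int) (M : Nat) (hc : c.length = M) :
    ∀ d j, j + d = M → (∀ i, i < j → c.getD i 0 = 0) →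
    innerA deps c M (List.range' j d)
      = (List.range' j (cntB c M - j)).filterMap (fun k =>
          if c.getD k 0 < deps.getD k 0 then
            some (c.take k ++ [c.getD k 0 + 1] ++ c.drop (k + 1))
          else none) := by
  intro d
  induction d with
  | zero =>
    intro j hj _
    have hcnt : cntB c M ≤ M := cntB_le c M hc
    have : cntB c M - j = 0 := by omega
    simp [innerA, this]
  | succ d ih =>
    intro j hj hz
    have hjM : j < M := by omega
    rw [List.range'_succ]
    by_cases hnz : c.getD j 0 ≠ 0
    · have hf : firstNZ c = some j := fnz_eq_some hz (by omega) hnz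
      have hcnt : cntB c M = j + 1 := by simp [cntB, hf]
      rw [hcnt]
      simp only [innerA]
      rw [(by omega : j + 1 - j = 1), List.range'_one, List.filterMap_cons]
      rw [yield_eq c M j hc hjM]
      split <;> simp
    · rw [not_ne_iff] at hnz
      have hz' : ∀ i, i < j + 1 → c.getD i 0 = 0 := by
        intro i hi
        rcases Nat.lt_succ_iff_lt_or_eq.mp hi with h | h
        · exact hz i h
        · subst h; exact hnz
      have hcnt : j + 1 ≤ cntB c M := by
        cases h : firstNZ c with
        | none => simp only [cntB, h]; omega
        | some i =>
          obtain ⟨h1, h2⟩ := fnz_some h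
          simp only [cntB, h]
          by_contra hlt
          exact h2 (hz' i (by omega))
      have hsplit : cntB c M - j = (cntB c M - (j + 1)) + 1 := by omega
      rw [hsplit, List.range'_succ, List.filterMap_cons]
      have hrec := ih (j + 1) (by omega) hz'
      simp only [innerA, hnz, ne_eq, not_true_eq_false, if_false, hrec]
      rw [yield_eq c M j hc hjM]
      split <;> simp_all [List.getD_eq_getElem?_getD]

lemma step_eq (deps c : List Int) (hc : c.length = deps.length) :
    innerA deps c deps.length (List.range deps.length) = stepB deps c deps.length := by
  have h := inner_eq_from deps c deps.length hc deps.length 0 (by omega) (by omega)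
  unfold stepB
  have hcnt : ((match firstNZ c with
      | some i => (i : Int) | none => (deps.length : Int) - 1) + 1).toNat
      = cntB c deps.length := by
    cases hf : firstNZ c with
    | none => simp [cntB, hf]
    | some i => simp only [cntB, hf]; omega
  rw [hcnt]
  simp only [List.range_eq_range']
  simpa using h

lemma innerA_mem_length (deps c : List Int) (M : Nat) :
    ∀ ks x, x ∈ innerA deps c M ks → x.length = M := by
  intro ks
  induction ks with
  | nil => intro x hx; simp [innerA] at hx
  | cons k ks ih =>
    intro x hx
    simp only [innerA, List.mem_append] at hx
    rcases hx with hx | hx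
    · split at hx <;> simp at hx
      subst hx; simp
    · split at hx
      · simp at hx
      · exact ih x hx

lemma boxAuxA_mem_length (deps : List Int) :
    ∀ m c, c ∈ boxAuxA deps m → c.length = deps.length := by
  intro m
  induction m with
  | zero => intro c hc; simp [boxAuxA] at hc; subst hc; simp
  | succ m ih =>
    intro c hc
    simp only [boxAuxA, List.mem_flatMap] at hc
    obtain ⟨c', _, hc⟩ := hc
    exact innerA_mem_length deps c' deps.length _ c hc

lemma boxAux_eq_foldl (deps : List Int) (m : Nat) :
    boxAuxA deps m
      = (List.range m).foldl
          (fun configs _ => configs.flatMap (fun c => stepB deps c deps.length))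
          [List.replicate deps.length (0 : Int)] := by
  induction m with
  | zero => simp [boxAuxA]
  | succ m ih =>
    rw [List.range_succ, List.foldl_append, ← ih]
    simp only [boxAuxA, List.foldl_cons, List.foldl_nil]
    apply List.flatMap_congr
    intro c hc
    exact step_eq deps c (boxAuxA_mem_length deps m c hc)

-- ===== VERDICT (by name: the statement is the Claim_ definition above) =====
theorem boxicles_spec : Claim_equal_boxicles := by
  intro n deps _ _
  unfold Spec_boxicles boxicles boxicles_alt
  exact boxAux_eq_foldl deps n.toNat
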